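-- pv_equiv track=rewrite | github.com/vinchinzu/euler | python/626.py | num_restricted_rows
-- ===== SOURCE A (Python) =====
-- from collections import Counter
-- from math import gcd
--
-- def num_restricted_rows(
--     permutation: Counter, other_permutation: Counter
-- ) -> int:
--     """Count restricted rows."""
--     count = 0
--     for size in permutation:
--         for other_size in other_permutation:
--             if (other_size // gcd(size, other_size)) % 2 == 1:
--                 count += permutation[size]
--                 break
--     return count
-- ===== SOURCE B (Python) =====
-- def num_restricted_rows(permutation, other_permutation):
--     """Count restricted rows: single pass over each argument.
--
--     (other // gcd(size, other)) is odd  iff  other != 0 and v2(other) <= v2(size),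
--     so a size qualifies iff it is divisible by 2**m, where m is the minimum
--     2-adic valuation over the nonzero other sizes."""
--     m = None
--     for o in other_permutation:
--         if o == 0:
--             continue
--         x = abs(o)
--         v = 0
--         while x % 2 == 0:
--             x //= 2
--             v += 1
--         if m is None or v < m:
--             m = v
--     if m is None:
--         return 0
--     p = 2 ** m
--     return sum(c for s, c in permutation.items() if s % p == 0)
-- ===== Notes on version B (the rewrite author's own statement) =====
-- stated objective: faster
-- what changed: A rescans all other sizes with a gcd-parity test for every size (nested loops); B uses that the test '(other // gcd(size, other)) % 2 == 1' holds iff other != 0 and v2(other) <= v2(size), so it computes the minimum 2-adic valuation m over the nonzero other sizes in one pass and then sums the multiplicities of the sizes divisible by 2**m in a single pass.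
import Mathlib
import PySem

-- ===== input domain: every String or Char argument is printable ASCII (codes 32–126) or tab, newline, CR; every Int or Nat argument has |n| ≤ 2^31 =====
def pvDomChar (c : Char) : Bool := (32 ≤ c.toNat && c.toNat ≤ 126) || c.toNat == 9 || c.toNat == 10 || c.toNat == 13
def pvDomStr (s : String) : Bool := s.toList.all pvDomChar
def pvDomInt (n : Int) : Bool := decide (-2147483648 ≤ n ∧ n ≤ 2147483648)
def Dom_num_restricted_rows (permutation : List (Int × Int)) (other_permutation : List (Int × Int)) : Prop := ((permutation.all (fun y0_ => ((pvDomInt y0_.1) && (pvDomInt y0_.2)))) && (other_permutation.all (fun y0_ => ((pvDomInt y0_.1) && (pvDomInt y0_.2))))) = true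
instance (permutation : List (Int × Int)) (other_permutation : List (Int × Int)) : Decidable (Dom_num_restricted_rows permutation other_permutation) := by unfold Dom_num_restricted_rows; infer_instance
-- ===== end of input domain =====

-- B replaces A's nested scan (for every size, rescan all other sizes with a gcd test)
-- by one pass computing the minimal 2-adic valuation over the other sizes and one pass
-- summing the multiplicities of the sizes divisible by that power of two.

-- ===== PORT A =====
-- the test '(other_size // gcd(size, other_size)) % 2 == 1' (math.gcd is the nonnegative Int.gcd)
def pvCondA (size other_size : Int) : Bool :=
  PySem.Int.mod (PySem.Int.floordiv other_size (Int.gcd size other_size : Int)) 2 == 1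

def num_restricted_rows (permutation : List (Int × Int)) (other_permutation : List (Int × Int)) : Int :=
  -- the dict arguments, decoded exactly as Python builds a dict from the pairs
  let P := PySem.Dict.ofList permutation
  let O := PySem.Dict.ofList other_permutation
  -- 'for size in permutation: for other_size in other_permutation: if …: count += permutation[size]; break'
  P.keys.foldl (fun count size =>
    if O.keys.any (fun other_size => pvCondA size other_size) then count + P.getD size 0
    else count) 0

-- ===== PORT B =====
-- 'while x % 2 == 0: x //= 2; v += 1' on x = abs(o) > 0 (the x ≠ 0 guard only makes the
-- recursion well-founded in Lean; the loop is never entered at x = 0)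
def pvV2 (x : Nat) : Nat :=
  if h : x % 2 = 0 ∧ x ≠ 0 then pvV2 (x / 2) + 1 else 0
termination_by x
decreasing_by exact Nat.div_lt_self (Nat.pos_of_ne_zero h.2) (by norm_num)

-- one iteration of B's first loop: skip 0, else fold the running minimum valuation
def pvMinStep (m : Option Nat) (o : Int) : Option Nat :=
  if o = 0 then m
  else
    let v := pvV2 o.natAbs
    match m with
    | none => some v
    | some mv => if v < mv then some v else some mv

def num_restricted_rows_alt (permutation : List (Int × Int)) (other_permutation : List (Int × Int)) : Int :=
  let P := PySem.Dict.ofList permutation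
  let O := PySem.Dict.ofList other_permutation
  match O.keys.foldl pvMinStep none with
  | none => 0
  | some mv =>
      -- 'sum(c for s, c in permutation.items() if s % p == 0)' with p = 2 ** mv
      P.items.foldl (fun acc sc =>
        if PySem.Int.mod sc.1 ((2 : Int) ^ mv) = 0 then acc + sc.2 else acc) 0

-- ===== PRECONDITION & SPEC =====
-- Pre_ excludes exactly the inputs where A raises ZeroDivisionError: gcd(0, 0) = 0 is
-- reached iff 0 is a key of permutation and the FIRST key of other_permutation is 0
-- (any nonzero first key makes size 0 break out of the inner loop immediately).
def Pre_num_restricted_rows (permutation : List (Int × Int)) (other_permutation : List (Int × Int)) : Prop :=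
  ¬ ((∃ q ∈ permutation, q.1 = 0) ∧ ∃ r ∈ other_permutation.head?, r.1 = 0)
instance (permutation : List (Int × Int)) (other_permutation : List (Int × Int)) : Decidable (Pre_num_restricted_rows permutation other_permutation) := by unfold Pre_num_restricted_rows; infer_instance

def pvWitness_num_restricted_rows : (List (Int × Int)) × (List (Int × Int)) := ([(2, 3), (5, 1)], [(4, 1), (3, 2)])

def Spec_num_restricted_rows (permutation : List (Int × Int)) (other_permutation : List (Int × Int)) (out : Int) : Prop := out = num_restricted_rows_alt permutation other_permutation
instance (permutation : List (Int × Int)) (other_permutation : List (Int × Int)) (out : Int) : Decidable (Spec_num_restricted_rows permutation other_permutation out) := by unfold Spec_num_restricted_rows; infer_instance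

-- ===== CLAIM (what is proved, stated in full; the proofs are below) =====
def Claim_equal_num_restricted_rows : Prop := ∀ (permutation : List (Int × Int)) (other_permutation : List (Int × Int)), Dom_num_restricted_rows permutation other_permutation → Pre_num_restricted_rows permutation other_permutation → Spec_num_restricted_rows permutation other_permutation (num_restricted_rows permutation other_permutation)
-- ===== LEMMAS AND PROOFS =====

-- B's while loop computes the 2-adic valuation (the multiplicity of 2 in x)
lemma pvV2_eq_fact (x : Nat) (hx : x ≠ 0) : pvV2 x = x.factorization 2 := by
  induction x using Nat.strong_induction_on with
  | _ x ih =>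
    rw [pvV2]
    split_ifs with h
    · have h2 : (2 : Nat) ∣ x := Nat.dvd_of_mod_eq_zero h.1
      have hlt : x / 2 < x := Nat.div_lt_self (Nat.pos_of_ne_zero h.2) (by norm_num)
      have hne : x / 2 ≠ 0 := by
        rcases h2 with ⟨k, rfl⟩
        simpa [Nat.mul_div_cancel_left] using fun hk => h.2 (by simp [hk])
      rw [ih _ hlt hne]
      have hd := Nat.factorization_div (d := 2) (n := x) h2
      have h21 : (Nat.factorization 2) 2 = 1 := by
        simpa using Nat.Prime.factorization_self Nat.prime_two
      have h3 : (x / 2).factorization 2 = x.factorization 2 - 1 := by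
        rw [hd]; simp [h21]
      have hge : 1 ≤ x.factorization 2 :=
        (Nat.Prime.dvd_iff_one_le_factorization Nat.prime_two hx).1 h2
      omega
    · have hnd : ¬ (2 : Nat) ∣ x := by
        intro hd
        exact h ⟨Nat.mod_eq_zero_of_dvd hd, hx⟩
      rw [Nat.factorization_eq_zero_of_not_dvd hnd]

-- the arithmetic heart: the quotient b / gcd(a, b) is odd iff 2^(v2 b) divides a
lemma pv_nat_core (a b : Nat) (hb : b ≠ 0) :
    ¬ (2 ∣ b / Nat.gcd a b) ↔ 2 ^ (b.factorization 2) ∣ a := by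
  rcases Nat.eq_zero_or_pos a with rfl | ha
  · simp [Nat.gcd_zero_left, Nat.div_self (Nat.pos_of_ne_zero hb)]
  · have ha' : a ≠ 0 := Nat.pos_iff_ne_zero.mp ha
    have hgd : Nat.gcd a b ∣ b := Nat.gcd_dvd_right a b
    have hq : b / Nat.gcd a b ≠ 0 := by
      intro h0
      have := Nat.div_mul_cancel hgd
      rw [h0] at this
      simp at this
      exact hb this.symm
    have hfq : (b / Nat.gcd a b).factorization 2
        = b.factorization 2 - (Nat.gcd a b).factorization 2 := by
      rw [Nat.factorization_div hgd]; simp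
    have hfg : (Nat.gcd a b).factorization 2
        = min (a.factorization 2) (b.factorization 2) := by
      rw [Nat.factorization_gcd ha' hb]; simp
    rw [iff_comm, Nat.Prime.pow_dvd_iff_le_factorization Nat.prime_two ha',
      Nat.Prime.dvd_iff_one_le_factorization Nat.prime_two hq]
    omega

lemma pv_pow_dvd_natAbs (n : Nat) (z : Int) : (2 : Int) ^ n ∣ z ↔ 2 ^ n ∣ z.natAbs := by
  rw [← Int.natAbs_dvd_natAbs]; simp

-- A's per-pair test characterised: it fires iff other_size ≠ 0 and 2^(v2 other_size) ∣ size
lemma pvCondA_iff (s o : Int) :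
    pvCondA s o = true ↔ o ≠ 0 ∧ (2 : Int) ^ pvV2 o.natAbs ∣ s := by
  rcases eq_or_ne o 0 with rfl | ho
  · simp [pvCondA, PySem.Int.floordiv, PySem.Int.mod]
  · have hg : (0 : Int) < (Int.gcd s o : Int) := by
      exact_mod_cast Int.gcd_pos_of_ne_zero_right s ho
    have hgd : (Int.gcd s o : Int) ∣ o := Int.gcd_dvd_right s o
    have hb : o.natAbs ≠ 0 := Int.natAbs_ne_zero.mpr ho
    simp only [pvCondA, beq_iff_eq,
      PySem.Int.floordiv_eq_ediv_of_pos hg, PySem.Int.mod_eq_emod_of_pos (by norm_num : (0:Int) < 2)]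
    have hodd : o / (Int.gcd s o : Int) % 2 = 1 ↔ ¬ ((2 : Int) ∣ o / (Int.gcd s o : Int)) := by
      omega
    rw [hodd, ← Int.natAbs_dvd_natAbs, Int.natAbs_ediv_of_dvd hgd]
    have e1 : (2 : Int).natAbs = 2 := rfl
    have e2 : ((Int.gcd s o : Int)).natAbs = Nat.gcd s.natAbs o.natAbs := rfl
    rw [e1, e2, pv_nat_core s.natAbs o.natAbs hb, pvV2_eq_fact o.natAbs hb,
      pv_pow_dvd_natAbs, and_iff_right ho]

-- B's first loop: none iff no nonzero key was seen (and the accumulator started none)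
lemma pvMinStep_isSome (acc : Option Nat) (x : Int) (hx : x ≠ 0) :
    ∃ w, pvMinStep acc x = some w := by
  cases acc with
  | none => exact ⟨pvV2 x.natAbs, by simp [pvMinStep, hx]⟩
  | some a =>
    by_cases hlt : pvV2 x.natAbs < a
    · exact ⟨pvV2 x.natAbs, by simp [pvMinStep, hx, hlt]⟩
    · exact ⟨a, by simp [pvMinStep, hx, hlt]⟩

lemma pvMinFold_none_iff (l : List Int) (acc : Option Nat) :
    l.foldl pvMinStep acc = none ↔ acc = none ∧ ∀ o ∈ l, o = 0 := by
  induction l generalizing acc with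
  | nil => simp
  | cons x t ih =>
    simp only [List.foldl_cons, ih, List.mem_cons]
    by_cases hx : x = 0
    · subst hx
      have hs : pvMinStep acc 0 = acc := by simp [pvMinStep]
      rw [hs]
      constructor
      · rintro ⟨h1, h2⟩
        exact ⟨h1, fun o ho => ho.elim (fun h => h) (h2 o)⟩
      · rintro ⟨h1, h2⟩
        exact ⟨h1, fun o ho => h2 o (Or.inr ho)⟩
    · obtain ⟨w, hw⟩ := pvMinStep_isSome acc x hx
      rw [hw]
      constructor
      · rintro ⟨h1, -⟩
        exact absurd h1 (by simp)
      · rintro ⟨-, h2⟩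
        exact absurd (h2 x (Or.inl rfl)) hx

-- one non-skipped step of B's first loop yields the minimum of the accumulator and v2
lemma pvMinStep_spec (acc : Option Nat) (y : Int) (hy : y ≠ 0) :
    ∃ w, pvMinStep acc y = some w ∧ w ≤ pvV2 y.natAbs ∧ (∀ x, acc = some x → w ≤ x) ∧
      (w = pvV2 y.natAbs ∨ acc = some w) := by
  cases acc with
  | none => exact ⟨pvV2 y.natAbs, by simp [pvMinStep, hy], le_refl _, by simp, Or.inl rfl⟩
  | some a =>
    by_cases hlt : pvV2 y.natAbs < a
    · refine ⟨pvV2 y.natAbs, by simp [pvMinStep, hy, hlt], le_refl _, ?_, Or.inl rfl⟩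
      intro x hx
      simp only [Option.some.injEq] at hx
      omega
    · refine ⟨a, by simp [pvMinStep, hy, hlt], by omega, ?_, Or.inr rfl⟩
      intro x hx
      simp only [Option.some.injEq] at hx
      omega

-- B's first loop: a some result is the minimum valuation of the nonzero keys (or of acc)
lemma pvMinFold_some (l : List Int) (acc : Option Nat) (mv : Nat)
    (h : l.foldl pvMinStep acc = some mv) :
    (acc = some mv ∨ ∃ o ∈ l, o ≠ 0 ∧ pvV2 o.natAbs = mv) ∧
    (∀ x, acc = some x → mv ≤ x) ∧ (∀ o ∈ l, o ≠ 0 → mv ≤ pvV2 o.natAbs) := by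
  induction l generalizing acc with
  | nil =>
    simp only [List.foldl_nil] at h
    refine ⟨Or.inl h, fun x hx => ?_, by simp⟩
    rw [h] at hx
    simp only [Option.some.injEq] at hx
    omega
  | cons y t ih =>
    simp only [List.foldl_cons] at h
    by_cases hy : y = 0
    · subst hy
      have hs : pvMinStep acc 0 = acc := by simp [pvMinStep]
      rw [hs] at h
      obtain ⟨hmem, hacc, hall⟩ := ih acc h
      refine ⟨?_, hacc, ?_⟩
      · rcases hmem with h1 | ⟨o, ho, hp⟩
        · exact Or.inl h1
        · exact Or.inr ⟨o, List.mem_cons_of_mem _ ho, hp⟩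
      · intro o ho ho0
        rcases List.mem_cons.mp ho with rfl | ho'
        · exact absurd rfl ho0
        · exact hall o ho' ho0
    · obtain ⟨w, hw, hwv, hwacc, hwor⟩ := pvMinStep_spec acc y hy
      rw [hw] at h
      obtain ⟨hmem, hacc, hall⟩ := ih (some w) h
      have hmvw : mv ≤ w := hacc w rfl
      refine ⟨?_, ?_, ?_⟩
      · rcases hmem with h1 | ⟨o, ho, hp⟩
        · have hwmv : w = mv := by simpa using h1
          rcases hwor with h2 | h2
          · exact Or.inr ⟨y, List.mem_cons_self, hy, by rw [← h2, hwmv]⟩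
          · rw [hwmv] at h2
            exact Or.inl h2
        · exact Or.inr ⟨o, List.mem_cons_of_mem _ ho, hp⟩
      · intro x hx
        exact le_trans hmvw (hwacc x hx)
      · intro o ho ho0
        rcases List.mem_cons.mp ho with rfl | ho'
        · exact le_trans hmvw hwv
        · exact hall o ho' ho0

-- a fold that adds getD over the keys is the fold that adds the stored value over the items
lemma pvDict_keys_fold_eq_items (d : PySem.Dict Int Int) (hnd : d.keys.Nodup) (q : Int → Bool) :
    d.keys.foldl (fun count s => if q s then count + d.getD s 0 else count) 0 =
    d.items.foldl (fun acc p => if q p.1 then acc + p.2 else acc) 0 := by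
  have hk : d.keys = d.items.map Prod.fst := rfl
  rw [hk, List.foldl_map]
  refine PySem.List.foldl_congr_mem _ _ _ _ (fun acc p hp => ?_)
  rw [PySem.Dict.getD_of_mem_items d (by simpa using hp) hnd]

-- the two per-key conditions agree
lemma pv_cond_none (K : List Int) (s : Int) (hm : K.foldl pvMinStep none = none) :
    K.any (fun o => pvCondA s o) = false := by
  rw [List.any_eq_false]
  intro o ho
  obtain ⟨-, hz⟩ := (pvMinFold_none_iff K none).mp hm
  have := hz o ho
  subst this
  simp [pvCondA_iff]

lemma pv_cond_some (K : List Int) (s : Int) (mv : Nat)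
    (hm : K.foldl pvMinStep none = some mv) :
    K.any (fun o => pvCondA s o) = true ↔ PySem.Int.mod s ((2 : Int) ^ mv) = 0 := by
  obtain ⟨hmem, -, hall⟩ := pvMinFold_some K none mv hm
  rcases hmem with h1 | ⟨o0, ho0, hz0, hv0⟩
  · simp at h1
  · rw [PySem.Int.mod_eq_zero_iff_dvd, List.any_eq_true]
    constructor
    · rintro ⟨o, ho, hc⟩
      obtain ⟨hz, hd⟩ := (pvCondA_iff s o).mp hc
      exact dvd_trans (pow_dvd_pow 2 (hall o ho hz)) hd
    · intro hdvd
      exact ⟨o0, ho0, (pvCondA_iff s o0).mpr ⟨hz0, hv0 ▸ hdvd⟩⟩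

-- ===== VERDICT (by name: the statement is the Claim_ definition above) =====
theorem num_restricted_rows_spec : Claim_equal_num_restricted_rows := by
  intro permutation other_permutation _ _
  show num_restricted_rows permutation other_permutation
      = num_restricted_rows_alt permutation other_permutation
  unfold num_restricted_rows num_restricted_rows_alt
  set P := PySem.Dict.ofList permutation with hP
  set O := PySem.Dict.ofList other_permutation with hO
  have hnd : P.keys.Nodup := PySem.Dict.nodup_keys_ofList permutation
  rw [pvDict_keys_fold_eq_items P hnd (fun s => O.keys.any (fun o => pvCondA s o))]
  cases hm : O.keys.foldl pvMinStep none with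
  | none =>
    have hz : P.items.foldl (fun acc p =>
        if O.keys.any (fun o => pvCondA p.1 o) then acc + p.2 else acc) 0
        = P.items.foldl (fun acc _ => acc) 0 := by
      refine PySem.List.foldl_congr_mem _ _ _ _ (fun acc p _ => ?_)
      rw [pv_cond_none O.keys p.1 hm]
      simp
    simp only [hm]
    rw [hz, PySem.List.foldl_ignore]
  | some mv =>
    simp only [hm]
    refine PySem.List.foldl_congr_mem _ _ _ _ (fun acc p _ => ?_)
    by_cases hq : PySem.Int.mod p.1 ((2 : Int) ^ mv) = 0
    · rw [if_pos ((pv_cond_some O.keys p.1 mv hm).mpr hq), if_pos hq]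
    · rw [if_neg (fun hh => hq ((pv_cond_some O.keys p.1 mv hm).mp hh)),
        if_neg hq]
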